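-- pv_equiv track=rewrite | github.com/0xahzam/fromthedna | visualize.py | maximise
-- ===== SOURCE A (Python) =====
-- def maximise(e):
--     e = list(filter(lambda x: len(x) < 400, e.split("_")))
--     count = 0
--     for i in range(0, len(e)):
--         if len(e[i]) > count:
--             count = len(e[i])
--
--     for i in e:
--         if len(i) == count:
--             return (i)
-- ===== SOURCE B (Python) =====
-- def maximise(e):
--     first_by_len = {}
--     for p in e.split("_"):
--         n = len(p)
--         if n < 400 and n not in first_by_len:
--             first_by_len[n] = p
--     if not first_by_len:
--         return None
--     return first_by_len[max(first_by_len)]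
-- ===== Notes on version B (the rewrite author's own statement) =====
-- stated objective: alternative
-- what changed: A's max-length loop plus a second re-scan for the first piece of that length is replaced by a one-pass hash index (dict mapping each length < 400 to the FIRST piece of that length) followed by a lookup at the maximum key, so the re-scan disappears.
import Mathlib
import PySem

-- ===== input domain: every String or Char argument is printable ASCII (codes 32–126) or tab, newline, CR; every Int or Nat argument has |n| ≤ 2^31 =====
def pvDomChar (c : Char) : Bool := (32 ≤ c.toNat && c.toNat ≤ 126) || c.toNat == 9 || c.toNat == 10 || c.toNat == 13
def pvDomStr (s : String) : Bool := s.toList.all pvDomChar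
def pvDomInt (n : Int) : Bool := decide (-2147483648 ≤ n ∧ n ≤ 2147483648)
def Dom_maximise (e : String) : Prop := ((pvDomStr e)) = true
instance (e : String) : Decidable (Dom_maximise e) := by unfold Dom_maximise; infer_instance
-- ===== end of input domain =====

-- B replaces A's two passes (max-length loop + re-scan for the first piece of that length)
-- by a one-pass dict index length -> first piece (<400) and a lookup at the maximal key.


-- ===== PORT A =====
-- e = list(filter(lambda x: len(x) < 400, e.split("_"))); count-loop; first-match loop.
-- Python A returns None (no str) when the filtered list is empty; that case is outside
-- Pre_maximise, and the port's `.getD ""` is only reached there.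
def maximise (e : String) : String :=
  let xs := ((PySem.Str.split? e "_").getD []).filter (fun x => PySem.Str.len x < 400)
  let count := xs.foldl (fun c x => if PySem.Str.len x > c then PySem.Str.len x else c) 0
  (xs.find? (fun i => PySem.Str.len i == count)).getD ""

-- ===== PORT B =====
-- first_by_len = {}; for p in e.split("_"): if len(p) < 400 and len(p) not in first_by_len:
-- first_by_len[len(p)] = p; then first_by_len[max(first_by_len)].
-- Python B returns None on an empty dict; that case is outside Pre_maximise, and the
-- `if d.items = []` branch / the `.getD 0` default key are only reached there.
def maximise_alt (e : String) : String :=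
  let d := ((PySem.Str.split? e "_").getD []).foldl
    (fun d p =>
      let n := PySem.Str.len p
      if n < 400 ∧ d.contains n = false then d.insert n p else d)
    (PySem.Dict.empty : PySem.Dict Int String)
  if d.items = [] then ""
  else d.getD ((PySem.List.max? d.keys (fun k => k)).getD 0) ""

-- ===== PRECONDITION & SPEC =====
-- Pre_ excludes inputs on which every underscore-split piece has length ≥ 400: there the
-- Python A falls off both loops and returns None, which is not a str (Python B also returns None).
def Pre_maximise (e : String) : Prop :=
  ((PySem.Str.split? e "_").getD []).filter (fun x => PySem.Str.len x < 400) ≠ []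
instance (e : String) : Decidable (Pre_maximise e) := by unfold Pre_maximise; infer_instance
def pvWitness_maximise : String := "ab_c"

def Spec_maximise (e : String) (out : String) : Prop := out = maximise_alt e
instance (e : String) (out : String) : Decidable (Spec_maximise e out) := by unfold Spec_maximise; infer_instance

-- ===== CLAIM (what is proved, stated in full; the proofs are below) =====
def Claim_equal_maximise : Prop := ∀ (e : String), Dom_maximise e → Pre_maximise e → Spec_maximise e (maximise e)

-- ===== LEMMAS AND PROOFS =====

-- B's dict-building step and its fold
def pvStep (d : PySem.Dict Int String) (p : String) : PySem.Dict Int String :=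
  let n := PySem.Str.len p
  if n < 400 ∧ d.contains n = false then d.insert n p else d

-- A's running-max loop, as a function of the list (start 0, as in A)
def pvCount (xs : List String) : Int :=
  xs.foldl (fun c x => if PySem.Str.len x > c then PySem.Str.len x else c) 0

theorem pvLen_nonneg (s : String) : 0 ≤ PySem.Str.len s := by
  simp [PySem.Str.len]

theorem pvCount_foldl (t : List String) (c : Int) (hc : 0 ≤ c) :
    t.foldl (fun c x => if PySem.Str.len x > c then PySem.Str.len x else c) c
      = max c (pvCount t) := by
  induction t generalizing c with
  | nil =>
      have h0 : pvCount ([] : List String) = 0 := rfl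
      simp [h0]; omega
  | cons x t ih =>
      have hx := pvLen_nonneg x
      have h1 : 0 ≤ (if PySem.Str.len x > c then PySem.Str.len x else c) := by
        split_ifs <;> omega
      have h2 : 0 ≤ (if PySem.Str.len x > (0:Int) then PySem.Str.len x else 0) := by
        split_ifs <;> omega
      have hcns : pvCount (x :: t)
          = t.foldl (fun c x => if PySem.Str.len x > c then PySem.Str.len x else c)
              (if PySem.Str.len x > (0:Int) then PySem.Str.len x else 0) := rfl
      rw [List.foldl_cons, ih _ h1, hcns, ih _ h2]
      simp only [Int.max_def]
      split_ifs <;> omega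

theorem pvCount_cons (x : String) (t : List String) :
    pvCount (x :: t) = max (PySem.Str.len x) (pvCount t) := by
  have hx := pvLen_nonneg x
  have h2 : 0 ≤ (if PySem.Str.len x > (0:Int) then PySem.Str.len x else 0) := by
    split_ifs <;> omega
  have hcns : pvCount (x :: t)
      = t.foldl (fun c x => if PySem.Str.len x > c then PySem.Str.len x else c)
          (if PySem.Str.len x > (0:Int) then PySem.Str.len x else 0) := rfl
  rw [hcns, pvCount_foldl _ _ h2]
  simp only [Int.max_def]
  split_ifs <;> omega

theorem pvCount_le (t : List String) : ∀ y ∈ t, PySem.Str.len y ≤ pvCount t := by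
  induction t with
  | nil => simp
  | cons x t ih =>
      intro y hy
      rw [pvCount_cons]
      rcases List.mem_cons.mp hy with h | h
      · subst h; omega
      · have := ih y h; omega

theorem pvCount_attained (t : List String) (h : t ≠ []) :
    ∃ y ∈ t, PySem.Str.len y = pvCount t := by
  induction t with
  | nil => exact absurd rfl h
  | cons x t ih =>
      rw [pvCount_cons]
      by_cases ht : t = []
      · subst ht
        refine ⟨x, by simp, ?_⟩
        have := pvLen_nonneg x
        have h0 : pvCount ([] : List String) = 0 := rfl
        rw [h0]; omega
      · obtain ⟨y, hy, hey⟩ := ih ht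
        by_cases hc : PySem.Str.len x ≥ pvCount t
        · exact ⟨x, by simp, by omega⟩
        · exact ⟨y, by simp [hy], by omega⟩

-- lookup in B's fold = first-match search in A's filtered list
theorem pvGet_fold (xs : List String) : ∀ (d : PySem.Dict Int String) (n : Int),
    (xs.foldl pvStep d).get? n
      = ((d.get? n).or
          ((xs.filter (fun p => PySem.Str.len p < 400)).find? (fun p => PySem.Str.len p == n))) := by
  induction xs with
  | nil => intro d n; simp
  | cons p xs ih =>
      intro d n
      by_cases h4 : PySem.Str.len p < 400
      · by_cases hc : d.contains (PySem.Str.len p) = false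
        · have hs : pvStep d p = d.insert (PySem.Str.len p) p := by
            unfold pvStep
            show (if PySem.Str.len p < 400 ∧ d.contains (PySem.Str.len p) = false
                  then d.insert (PySem.Str.len p) p else d) = _
            exact if_pos ⟨h4, hc⟩
          rw [List.foldl_cons, hs, ih]
          by_cases hn : n = PySem.Str.len p
          · subst hn
            rw [PySem.Dict.get?_insert_self]
            have hdn : d.get? (PySem.Str.len p) = none := by
              have hce := PySem.Dict.contains_eq_isSome_get? (d := d) (k := PySem.Str.len p)
              rw [hc] at hce
              cases hg : d.get? (PySem.Str.len p) with
              | none => rfl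
              | some v => rw [hg] at hce; simp at hce
            rw [hdn]
            rw [List.filter_cons_of_pos (by simpa using h4)]
            rw [List.find?_cons_of_pos (by simp)]
            simp
          · rw [PySem.Dict.get?_insert_of_ne (hne := hn)]
            rw [List.filter_cons_of_pos (by simpa using h4)]
            rw [List.find?_cons_of_neg (by simp only [beq_iff_eq]; exact fun h => hn h.symm)]
        · have hs : pvStep d p = d := by
            unfold pvStep
            show (if PySem.Str.len p < 400 ∧ d.contains (PySem.Str.len p) = false
                  then d.insert (PySem.Str.len p) p else d) = _
            exact if_neg (fun hcon => absurd hcon.2 (by simpa using hc))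
          rw [List.foldl_cons, hs, ih]
          rw [List.filter_cons_of_pos (by simpa using h4)]
          by_cases hn : n = PySem.Str.len p
          · subst hn
            have hsome : (d.get? (PySem.Str.len p)).isSome := by
              have hce := PySem.Dict.contains_eq_isSome_get? (d := d) (k := PySem.Str.len p)
              simp only [Bool.not_eq_false] at hc
              rw [hc] at hce
              exact hce.symm ▸ rfl
            obtain ⟨v, hv⟩ := Option.isSome_iff_exists.mp hsome
            rw [hv]
            simp
          · rw [List.find?_cons_of_neg (by simp only [beq_iff_eq]; exact fun h => hn h.symm)]
      · have hs : pvStep d p = d := by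
          unfold pvStep
          show (if PySem.Str.len p < 400 ∧ d.contains (PySem.Str.len p) = false
                then d.insert (PySem.Str.len p) p else d) = _
          exact if_neg (fun hcon => h4 hcon.1)
        rw [List.foldl_cons, hs, ih]
        rw [List.filter_cons_of_neg (by simpa using h4)]

theorem pvNodup_fold (xs : List String) : ∀ (d : PySem.Dict Int String),
    d.keys.Nodup → (xs.foldl pvStep d).keys.Nodup := by
  induction xs with
  | nil => intro d h; simpa using h
  | cons p xs ih =>
      intro d h
      rw [List.foldl_cons]
      apply ih
      unfold pvStep
      show (if PySem.Str.len p < 400 ∧ d.contains (PySem.Str.len p) = false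
            then d.insert (PySem.Str.len p) p else d).keys.Nodup
      split_ifs with hi
      · exact PySem.Dict.nodup_keys_insert _ _ _ h
      · exact h

-- ===== VERDICT (by name: the statement is the Claim_ definition above) =====
theorem maximise_spec : Claim_equal_maximise := by
  intro e _ hpre
  unfold Pre_maximise at hpre
  unfold Spec_maximise maximise maximise_alt
  show ((((PySem.Str.split? e "_").getD []).filter (fun x => PySem.Str.len x < 400)).find?
          (fun i => PySem.Str.len i ==
            pvCount (((PySem.Str.split? e "_").getD []).filter (fun x => PySem.Str.len x < 400)))).getD ""
      = (if (((PySem.Str.split? e "_").getD []).foldl pvStep PySem.Dict.empty).items = [] then ""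
         else (((PySem.Str.split? e "_").getD []).foldl pvStep PySem.Dict.empty).getD
           ((PySem.List.max? (((PySem.Str.split? e "_").getD []).foldl pvStep PySem.Dict.empty).keys
              (fun k => k)).getD 0) "")
  set xs0 := ((PySem.Str.split? e "_").getD []) with hxs0
  set L := xs0.filter (fun x => PySem.Str.len x < 400) with hL
  set d := xs0.foldl pvStep (PySem.Dict.empty : PySem.Dict Int String) with hd
  have hget : ∀ n, d.get? n = L.find? (fun p => PySem.Str.len p == n) := by
    intro n
    rw [hd, pvGet_fold]
    simp [hL]
  have hnodup : d.keys.Nodup := pvNodup_fold _ _ (by simp [PySem.Dict.keys, PySem.Dict.empty])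
  -- count is attained and maximal over the dict keys
  obtain ⟨y, hyL, hylen⟩ := pvCount_attained L hpre
  have hgetc : ∃ v, d.get? (pvCount L) = some v := by
    rw [hget]
    have hfs : (L.find? (fun p => PySem.Str.len p == pvCount L)).isSome := by
      rw [List.find?_isSome]
      exact ⟨y, hyL, by simp only [beq_iff_eq]; exact hylen⟩
    exact Option.isSome_iff_exists.mp hfs
  obtain ⟨v, hv⟩ := hgetc
  have hcmem : pvCount L ∈ d.keys := by
    rw [← PySem.Dict.contains_iff_mem_keys]
    rw [PySem.Dict.contains_eq_isSome_get?, hv]; rfl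
  have hkle : ∀ k ∈ d.keys, k ≤ pvCount L := by
    intro k hk
    have hks : (d.get? k).isSome := by
      rw [← PySem.Dict.contains_eq_isSome_get?, PySem.Dict.contains_iff_mem_keys]
      exact hk
    obtain ⟨w, hw⟩ := Option.isSome_iff_exists.mp hks
    rw [hget] at hw
    have hmem : w ∈ L := List.mem_of_find?_eq_some hw
    have hpred : (PySem.Str.len w == k) = true := (List.find?_eq_some_iff_append.mp hw).1
    have hwk : PySem.Str.len w = k := by simpa using hpred
    have hle := pvCount_le L w hmem
    omega
  -- Python's max over the dict keys is A's count
  have hmax : PySem.List.max? d.keys (fun k => k) = some (pvCount L) := by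
    cases hm : PySem.List.max? d.keys (fun k => k) with
    | none =>
        have hke : d.keys = [] := (PySem.List.max?_eq_none_iff _ _).mp hm
        rw [hke] at hcmem; exact absurd hcmem (List.not_mem_nil)
    | some m =>
        have hmm : m ∈ d.keys := PySem.List.max?_mem hm
        have h1 : pvCount L ≤ m := PySem.List.max?_isMax hm _ hcmem
        have h2 : m ≤ pvCount L := hkle m hmm
        have hmc : m = pvCount L := le_antisymm h2 h1
        rw [hmc]
  have hitems : d.items ≠ [] := by
    intro h
    have hke : d.keys = [] := by simp [PySem.Dict.keys, h]
    rw [hke] at hcmem; exact absurd hcmem (List.not_mem_nil)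
  rw [if_neg hitems, hmax]
  rw [Option.getD_some, PySem.Dict.getD_eq_get?_getD, hget]
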